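-- pv_equiv track=rewrite | github.com/kellysteele168/Optimization-Algorithms | Project 1/Project1_C.py | DPKP
-- ===== SOURCE A (Python) =====
-- def DPKP(v, s, C):
--     n = len(v)
--     V = [ [0 for cp in range(int(C)+1)] for j in range (n)  ]
--     X = [ [0 for cp in range(int(C)+1)] for j in range (n)  ]
--
--     for cp in range(int(C)+1):
--         if s[n-1] <= cp:
--             V[n-1][cp] = v[n-1]
--             X[n-1][cp] = 1
--
--     for i in reversed(range(n-1)):
--         for cp in range(int(C)+1):
--             if s[i] <= cp:
--                 if v[i] + V[i+1][cp-s[i]] > V[i+1][cp]: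
--                     V[i][cp] = v[i] + V[i+1][cp-s[i]]
--                     X[i][cp] = 1
--                 else:
--                     V[i][cp] = V[i+1][cp]
--             else:
--                 V[i][cp] = V[i+1][cp]
--
--     return V, X
-- ===== SOURCE B (Python) =====
-- def DPKP(v, s, C):
--     W = int(C) + 1
--     cps = range(W)
--
--     def rows(vs, ss):
--         vi, si = vs[0], ss[0]
--         if len(vs) == 1:
--             return ([[vi if si <= cp else 0 for cp in cps]],
--                     [[1 if si <= cp else 0 for cp in cps]])
--         Vrest, Xrest = rows(vs[1:], ss[1:])
--         prev = Vrest[0]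
--         pairs = [(vi + prev[cp - si], 1)
--                  if si <= cp and vi + prev[cp - si] > prev[cp]
--                  else (prev[cp], 0)
--                  for cp in cps]
--         return ([[p[0] for p in pairs]] + Vrest,
--                 [[p[1] for p in pairs]] + Xrest)
--
--     if not v:
--         return [], []
--     return rows(v, s[:len(v)])
-- ===== Notes on version B (the rewrite author's own statement) =====
-- stated objective: alternative
-- what changed: B replaces A's pre-allocated mutable n x (C+1) tables filled by imperative loops with a structural recursion on the item-list suffix that builds each (value row, decision row) pair functionally from the next row and prepends it, with no table mutation and no zero-initialisation.
-- outside the precondition, e.g. on DPKP([1], [], -1): A returns ([[]], [[]]), B raises IndexError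
import Mathlib
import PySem

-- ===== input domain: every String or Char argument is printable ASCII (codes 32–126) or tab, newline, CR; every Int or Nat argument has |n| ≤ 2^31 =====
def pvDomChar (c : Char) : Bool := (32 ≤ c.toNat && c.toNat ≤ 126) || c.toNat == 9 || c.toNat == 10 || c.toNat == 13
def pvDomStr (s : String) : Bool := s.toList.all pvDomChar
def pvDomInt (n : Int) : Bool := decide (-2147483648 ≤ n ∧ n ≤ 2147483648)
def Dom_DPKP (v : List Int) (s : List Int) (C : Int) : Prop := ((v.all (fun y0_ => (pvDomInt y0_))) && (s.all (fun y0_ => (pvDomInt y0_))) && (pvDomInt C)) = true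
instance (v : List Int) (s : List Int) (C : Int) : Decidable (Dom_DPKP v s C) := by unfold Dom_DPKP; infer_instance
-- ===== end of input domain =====

-- B builds the DP rows by structural recursion on the item suffix (no mutable tables); A fills pre-allocated tables imperatively. Equal on Pre_.

-- ===== PORT A =====
-- shared primitive: Python xs[i] read with default (total form; exact under Pre_, where every index is in range)
def pyGetI (xs : List Int) (i : Int) : Int := PySem.List.pyGetD xs i 0
-- Python M[i][c] = x : read row i, set cell c, write row back (total form; exact under Pre_)
def set2 (M : List (List Int)) (i c : Int) (x : Int) : List (List Int) :=
  PySem.List.pySetD M i (PySem.List.pySetD (PySem.List.pyGetD M i []) c x)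

-- the body of A's first loop ('if s[n-1] <= cp: V[n-1][cp] = v[n-1]; X[n-1][cp] = 1')
def baseStep (v s : List Int) (n : Int) (st : List (List Int) × List (List Int)) (cp : Int) :
    List (List Int) × List (List Int) :=
  if pyGetI s (n - 1) ≤ cp then
    (set2 st.1 (n - 1) cp (pyGetI v (n - 1)), set2 st.2 (n - 1) cp 1)
  else st

-- the body of A's nested loop over cp (for a fixed i)
def innerStep (v s : List Int) (i : Int) (st : List (List Int) × List (List Int)) (cp : Int) :
    List (List Int) × List (List Int) :=
  if pyGetI s i ≤ cp then
    if pyGetI v i + pyGetI (PySem.List.pyGetD st.1 (i + 1) []) (cp - pyGetI s i)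
        > pyGetI (PySem.List.pyGetD st.1 (i + 1) []) cp then
      (set2 st.1 i cp (pyGetI v i + pyGetI (PySem.List.pyGetD st.1 (i + 1) []) (cp - pyGetI s i)),
       set2 st.2 i cp 1)
    else (set2 st.1 i cp (pyGetI (PySem.List.pyGetD st.1 (i + 1) []) cp), st.2)
  else (set2 st.1 i cp (pyGetI (PySem.List.pyGetD st.1 (i + 1) []) cp), st.2)

def DPKP (v : List Int) (s : List Int) (C : Int) : List (List Int) × List (List Int) :=
  let n : Int := v.length
  let cps := PySem.List.pyRange 0 (C + 1) 1                     -- range(int(C)+1)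
  let V0 : List (List Int) := (PySem.List.pyRange 0 n 1).map (fun _ => cps.map (fun _ => (0 : Int)))
  let X0 : List (List Int) := (PySem.List.pyRange 0 n 1).map (fun _ => cps.map (fun _ => (0 : Int)))
  let st1 := cps.foldl (baseStep v s n) (V0, X0)
  ((PySem.List.pyRange 0 (n - 1) 1).reverse).foldl (fun st i => cps.foldl (innerStep v s i) st) st1

-- ===== PORT B =====
-- B's recursive helper 'rows(vs, ss)': rows for the suffix, built from the next row
def rowsB (cps : List Int) : List Int → List Int → List (List Int) × List (List Int)
  | [vi], si :: _ =>
      ([cps.map (fun cp => if si ≤ cp then vi else 0)],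
       [cps.map (fun cp => if si ≤ cp then (1 : Int) else 0)])
  | vi :: vrest, si :: srest =>
      let r := rowsB cps vrest srest
      let prev := PySem.List.pyGetD r.1 0 []
      let pairs := cps.map (fun cp =>
        if si ≤ cp ∧ vi + pyGetI prev (cp - si) > pyGetI prev cp then
          (vi + pyGetI prev (cp - si), (1 : Int))
        else (pyGetI prev cp, (0 : Int)))
      (pairs.map Prod.fst :: r.1, pairs.map Prod.snd :: r.2)
  | _, _ => ([], [])

def DPKP_alt (v : List Int) (s : List Int) (C : Int) : List (List Int) × List (List Int) :=
  let cps := PySem.List.pyRange 0 (C + 1) 1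
  if v = [] then ([], [])
  else rowsB cps v (s.take v.length)    -- s[:len(v)] (exact: the bound is ≥ 0)

-- ===== PRECONDITION & SPEC =====
-- Pre_ excludes exactly the inputs where A raises IndexError: v = [] with 0 ≤ C (s[-1]/V[-1]),
-- len(s) < len(v) (s[n-1]), or 0 ≤ C with a negative size among s[:n-1] (V[i+1][cp-s[i]] past the
-- row end) — plus, so that B's recursion is defined, len(s) < len(v) also when C < 0, where A
-- returns n empty rows but B raises (see the cite).
def Pre_DPKP (v : List Int) (s : List Int) (C : Int) : Prop :=
  (v ≠ [] ∨ C < 0) ∧ v.length ≤ s.length ∧ (0 ≤ C → ∀ x ∈ s.take (v.length - 1), 0 ≤ x)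
instance (v : List Int) (s : List Int) (C : Int) : Decidable (Pre_DPKP v s C) := by
  unfold Pre_DPKP; infer_instance

def pvWitness_DPKP : List Int × List Int × Int := ([3, 4, 5], [2, 3, 4], 5)

def Spec_DPKP (v : List Int) (s : List Int) (C : Int) (out : List (List Int) × List (List Int)) : Prop := out = DPKP_alt v s C
instance (v : List Int) (s : List Int) (C : Int) (out : List (List Int) × List (List Int)) : Decidable (Spec_DPKP v s C out) := by unfold Spec_DPKP; infer_instance

-- ===== CLAIM (what is proved, stated in full; the proofs are below) =====
def Claim_equal_DPKP : Prop := ∀ (v : List Int) (s : List Int) (C : Int), Dom_DPKP v s C → Pre_DPKP v s C → Spec_DPKP v s C (DPKP v s C)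

-- ===== LEMMAS AND PROOFS =====

-- value written by A into V[i][cp] (and computed by B's comprehension), as a function of cp
def gV (vi si : Int) (prev : List Int) (c : Int) : Int :=
  if si ≤ c then
    (if vi + pyGetI prev (c - si) > pyGetI prev c then vi + pyGetI prev (c - si) else pyGetI prev c)
  else pyGetI prev c

-- value of X[i][cp] after A's inner loop (and of B's decision row)
def gX (vi si : Int) (prev : List Int) (c : Int) : Int :=
  if si ≤ c ∧ vi + pyGetI prev (c - si) > pyGetI prev c then 1 else 0

-- the state of A's tables after the rows ≥ j have been filled: j zero rows on top of B's rows for the suffix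
def stateJ (cps v s' : List Int) (j : Nat) : List (List Int) × List (List Int) :=
  (List.replicate j (cps.map fun _ => (0:Int)) ++ (rowsB cps (v.drop j) (s'.drop j)).1,
   List.replicate j (cps.map fun _ => (0:Int)) ++ (rowsB cps (v.drop j) (s'.drop j)).2)

theorem cps_eq (C : Int) :
    PySem.List.pyRange 0 (C + 1) 1 = (List.range (C+1).toNat).map (fun k : Nat => (k:Int)) := by
  simp only [PySem.List.pyRange_one, sub_zero, zero_add]

theorem pyGetI_nat (xs : List Int) (j : Nat) (h : j < xs.length) : pyGetI xs (j:Int) = xs[j] := by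
  simp [pyGetI, PySem.List.pyGetD_natCast, List.getD, h]

theorem getD_append_cons1 {α : Type} (P : List α) (r p : α) (S : List α) (d : α) :
    (P ++ r :: p :: S).getD (P.length + 1) d = p := by simp [List.getD]

theorem set2_append (P : List (List Int)) (r : List Int) (S : List (List Int)) (i : Nat)
    (hP : P.length = i) (c x : Int) :
    set2 (P ++ r :: S) (i:Int) c x = P ++ (PySem.List.pySetD r c x) :: S := by
  subst hP
  simp [set2, PySem.List.pyGetD_natCast, PySem.List.pySetD_natCast, List.getD]

theorem setRow_step (dV : List Int) (k : Nat) (x : Int) :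
    PySem.List.pySetD (dV ++ List.replicate (k+1) 0) ((dV.length : Nat) : Int) x
      = (dV ++ [x]) ++ List.replicate k 0 := by
  simp [PySem.List.pySetD_natCast, List.replicate_succ]

theorem innerStep_eq (v s : List Int) (i : Nat) (P Q S T : List (List Int))
    (rV rX prev : List Int) (hP : P.length = i) (hQ : Q.length = i) (c : Int) :
    innerStep v s (i:Int) (P ++ rV :: prev :: S, Q ++ rX :: T) c
    = (P ++ (PySem.List.pySetD rV c (gV (pyGetI v i) (pyGetI s i) prev c)) :: prev :: S,
       Q ++ (if pyGetI s (i:Int) ≤ c ∧ pyGetI v (i:Int) + pyGetI prev (c - pyGetI s i) > pyGetI prev c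
             then PySem.List.pySetD rX c 1 else rX) :: T) := by
  have hrow : PySem.List.pyGetD (P ++ rV :: prev :: S) ((i:Int) + 1) [] = prev := by
    have : (i:Int) + 1 = ((i+1 : Nat) : Int) := by push_cast; ring
    rw [this, PySem.List.pyGetD_natCast, ← hP, getD_append_cons1]
  unfold innerStep gV
  rw [hrow]
  by_cases h1 : pyGetI s (i:Int) ≤ c
  · by_cases h2 : pyGetI v (i:Int) + pyGetI prev (c - pyGetI s i) > pyGetI prev c <;>
      simp [h1, h2, set2_append P rV (prev :: S) i hP, set2_append Q rX T i hQ]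
  · simp [h1, set2_append P rV (prev :: S) i hP]

theorem innerFill (v s : List Int) (i : Nat) (prev : List Int) :
    ∀ (k m : Nat) (P Q S T : List (List Int)) (dV dX : List Int),
    P.length = i → Q.length = i → dV.length = m → dX.length = m →
    ((List.range' m k).map (fun a : Nat => (a:Int))).foldl (innerStep v s (i:Int))
      (P ++ (dV ++ List.replicate k 0) :: prev :: S, Q ++ (dX ++ List.replicate k 0) :: T)
    = (P ++ (dV ++ (List.range' m k).map (fun a : Nat => gV (pyGetI v i) (pyGetI s i) prev (a:Int))) :: prev :: S,
       Q ++ (dX ++ (List.range' m k).map (fun a : Nat => gX (pyGetI v i) (pyGetI s i) prev (a:Int))) :: T) := by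
  intro k
  induction k with
  | zero => intro m P Q S T dV dX hP hQ _ _; simp
  | succ k ih =>
    intro m P Q S T dV dX hP hQ hdV hdX
    rw [List.range'_succ, List.map_cons, List.foldl_cons,
        innerStep_eq v s i P Q S T _ _ prev hP hQ (m:Int)]
    have hV : PySem.List.pySetD (dV ++ List.replicate (k+1) 0) (m:Int)
        (gV (pyGetI v i) (pyGetI s i) prev (m:Int)) = (dV ++ [gV (pyGetI v i) (pyGetI s i) prev (m:Int)]) ++ List.replicate k 0 := by
      rw [← hdV]; exact setRow_step dV k _
    have hX : (if pyGetI s (i:Int) ≤ (m:Int) ∧ pyGetI v (i:Int) + pyGetI prev ((m:Int) - pyGetI s i) > pyGetI prev (m:Int)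
        then PySem.List.pySetD (dX ++ List.replicate (k+1) 0) (m:Int) 1 else (dX ++ List.replicate (k+1) 0))
        = (dX ++ [gX (pyGetI v i) (pyGetI s i) prev (m:Int)]) ++ List.replicate k 0 := by
      unfold gX
      split_ifs with h
      · rw [← hdX]; exact setRow_step dX k _
      · simp [List.replicate_succ]
    rw [hV, hX, ih (m+1) P Q S T _ _ hP hQ (by simp [hdV]) (by simp [hdX])]
    simp

theorem baseFill (v s : List Int) (n : Int) (i : Nat) (hn : n - 1 = (i:Int)) :
    ∀ (k m : Nat) (P Q : List (List Int)) (dV dX : List Int),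
    P.length = i → Q.length = i → dV.length = m → dX.length = m →
    ((List.range' m k).map (fun a : Nat => (a:Int))).foldl (baseStep v s n)
      (P ++ [dV ++ List.replicate k 0], Q ++ [dX ++ List.replicate k 0])
    = (P ++ [dV ++ (List.range' m k).map (fun a : Nat => if pyGetI s (n-1) ≤ (a:Int) then pyGetI v (n-1) else 0)],
       Q ++ [dX ++ (List.range' m k).map (fun a : Nat => if pyGetI s (n-1) ≤ (a:Int) then (1:Int) else 0)]) := by
  intro k
  induction k with
  | zero => intro m P Q dV dX hP hQ _ _; simp
  | succ k ih =>
    intro m P Q dV dX hP hQ hdV hdX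
    rw [List.range'_succ, List.map_cons, List.foldl_cons]
    have hstep : baseStep v s n (P ++ [dV ++ List.replicate (k+1) 0], Q ++ [dX ++ List.replicate (k+1) 0]) (m:Int)
        = (P ++ [(dV ++ [if pyGetI s (n-1) ≤ (m:Int) then pyGetI v (n-1) else 0]) ++ List.replicate k 0],
           Q ++ [(dX ++ [if pyGetI s (n-1) ≤ (m:Int) then (1:Int) else 0]) ++ List.replicate k 0]) := by
      have e1 : ∀ x : Int, PySem.List.pySetD (dV ++ List.replicate (k+1) 0) (m:Int) x
          = (dV ++ [x]) ++ List.replicate k 0 := fun x => by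
        rw [← hdV]; exact setRow_step dV k x
      have e2 : ∀ x : Int, PySem.List.pySetD (dX ++ List.replicate (k+1) 0) (m:Int) x
          = (dX ++ [x]) ++ List.replicate k 0 := fun x => by
        rw [← hdX]; exact setRow_step dX k x
      unfold baseStep
      rw [hn]
      split_ifs with h
      · rw [set2_append P _ [] i hP, set2_append Q _ [] i hQ, e1, e2]
      · simp [List.replicate_succ]
    rw [hstep, ih (m+1) P Q _ _ hP hQ (by simp [hdV]) (by simp [hdX])]
    simp

theorem rowsB_single (cps : List Int) (vi si : Int) (ss : List Int) :
    rowsB cps [vi] (si :: ss)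
    = ([cps.map (fun cp => if si ≤ cp then vi else 0)],
       [cps.map (fun cp => if si ≤ cp then (1:Int) else 0)]) := by
  rfl

theorem rowsB_pair (cps : List Int) (vi si : Int) (vrest srest : List Int) (h : vrest ≠ []) :
    rowsB cps (vi :: vrest) (si :: srest)
    = (cps.map (gV vi si (PySem.List.pyGetD (rowsB cps vrest srest).1 0 [])) :: (rowsB cps vrest srest).1,
       cps.map (gX vi si (PySem.List.pyGetD (rowsB cps vrest srest).1 0 [])) :: (rowsB cps vrest srest).2) := by
  match vrest with
  | a :: l =>
    show (_, _) = _
    simp only [List.map_map, Prod.mk.injEq]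
    constructor
    · congr 1
      apply List.map_congr_left
      intro c _
      unfold gV
      by_cases h1 : si ≤ c <;> by_cases h2 : vi + pyGetI (PySem.List.pyGetD (rowsB cps (a :: l) srest).1 0 []) (c - si) > pyGetI (PySem.List.pyGetD (rowsB cps (a :: l) srest).1 0 []) c <;>
        simp [h1, h2]
    · congr 1
      apply List.map_congr_left
      intro c _
      unfold gX
      by_cases h1 : si ≤ c <;> by_cases h2 : vi + pyGetI (PySem.List.pyGetD (rowsB cps (a :: l) srest).1 0 []) (c - si) > pyGetI (PySem.List.pyGetD (rowsB cps (a :: l) srest).1 0 []) c <;>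
        simp [h1, h2]

theorem rowsB_shape (cps : List Int) (vs ss : List Int) (h1 : vs ≠ []) (h2 : ss ≠ []) :
    ∃ rv RV rx RX, rowsB cps vs ss = (rv :: RV, rx :: RX) := by
  match vs, ss with
  | [vi], si :: st => exact ⟨_, _, _, _, rowsB_single cps vi si st⟩
  | vi :: a :: l, si :: st => exact ⟨_, _, _, _, rowsB_pair cps vi si (a :: l) st (by simp)⟩

theorem zrow_eq (W : Nat) :
    ((List.range W).map (fun k : Nat => (k:Int))).map (fun _ => (0:Int)) = List.replicate W 0 := by
  rw [List.map_map]; simp [Function.comp_def, List.map_const']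

theorem pyRange_nat (n : Nat) : PySem.List.pyRange 0 (n:Int) 1 = (List.range n).map (fun k : Nat => (k:Int)) := by
  rw [PySem.List.pyRange_one]
  simp only [sub_zero, Int.toNat_natCast]
  exact List.map_congr_left (by intro a _; show (0:Int) + a = a; omega)

theorem F_state (v s s' : List Int) (W : Nat) (j : Nat)
    (hs' : s' = s.take v.length) (hj : j + 2 ≤ v.length) (hlen : v.length ≤ s.length) :
    ((List.range W).map (fun k : Nat => (k:Int))).foldl (innerStep v s (j:Int))
      (stateJ ((List.range W).map (fun k : Nat => (k:Int))) v s' (j+1))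
    = stateJ ((List.range W).map (fun k : Nat => (k:Int))) v s' j := by
  have hsl : s'.length = v.length := by simp [hs']; omega
  have hvne : v.drop (j+1) ≠ [] := by
    intro h; have := congrArg List.length h; simp at this; omega
  have hsne : s'.drop (j+1) ≠ [] := by
    intro h; have := congrArg List.length h; simp [hsl] at this; omega
  rw [List.range_eq_range']
  obtain ⟨pV, SV, pX, SX, hrows⟩ :=
    rowsB_shape ((List.range' 0 W).map (fun k : Nat => (k:Int))) _ _ hvne hsne
  have hz : ((List.range' 0 W).map (fun k : Nat => (k:Int))).map (fun _ => (0:Int))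
      = List.replicate W 0 := by
    rw [List.map_map]; simp [Function.comp_def, List.map_const']
  have hstate : stateJ ((List.range' 0 W).map (fun k : Nat => (k:Int))) v s' (j+1)
      = (List.replicate j (List.replicate W 0) ++ (List.replicate W 0) :: pV :: SV,
         List.replicate j (List.replicate W 0) ++ (List.replicate W 0) :: pX :: SX) := by
    unfold stateJ
    rw [hrows, hz, List.replicate_succ']
    simp
  have hfill := innerFill v s j pV W 0 (List.replicate j (List.replicate W 0))
      (List.replicate j (List.replicate W 0)) SV (pX :: SX) [] []
      (by simp) (by simp) rfl rfl
  simp only [List.nil_append] at hfill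
  rw [hstate, hfill]
  have hjv : j < v.length := by omega
  have hjs : j < s'.length := by omega
  have hdv : v.drop j = v[j] :: v.drop (j+1) := (List.getElem_cons_drop hjv).symm
  have hds : s'.drop j = s'[j] :: s'.drop (j+1) := (List.getElem_cons_drop hjs).symm
  unfold stateJ
  rw [hdv, hds,
      rowsB_pair ((List.range' 0 W).map (fun k : Nat => (k:Int))) v[j] s'[j] _ _ hvne, hrows]
  have hprev : PySem.List.pyGetD (pV :: SV) 0 [] = pV := by
    simp [PySem.List.pyGetD_zero_cons]
  have hvj : pyGetI v (j:Int) = v[j] := pyGetI_nat v j hjv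
  have hsj : pyGetI s (j:Int) = s'[j] := by
    rw [pyGetI_nat s j (by omega)]
    subst hs'
    simp [List.getElem_take]
  have hmap : ∀ (g : Int → Int → List Int → Int → Int),
      (List.range' 0 W).map (fun a : Nat => g (pyGetI v (j:Int)) (pyGetI s (j:Int)) pV (a:Int))
      = ((List.range' 0 W).map (fun k : Nat => (k:Int))).map (g v[j] s'[j] pV) := by
    intro g
    rw [List.map_map]
    exact List.map_congr_left (by intro a _; rw [hvj, hsj]; rfl)
  rw [hprev, hmap gV, hmap gX, hz]

theorem chain (v s s' : List Int) (W : Nat)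
    (hs' : s' = s.take v.length) (hlen : v.length ≤ s.length) :
    ∀ j, j + 1 ≤ v.length →
    (((List.range j).map (fun a : Nat => (a:Int))).reverse).foldl
      (fun st i => ((List.range W).map (fun k : Nat => (k:Int))).foldl (innerStep v s i) st)
      (stateJ ((List.range W).map (fun k : Nat => (k:Int))) v s' j)
    = stateJ ((List.range W).map (fun k : Nat => (k:Int))) v s' 0 := by
  intro j
  induction j with
  | zero => intro _; simp
  | succ j ih =>
    intro hj
    have hrev : ((List.range (j+1)).map (fun a : Nat => (a:Int))).reverse
        = (j:Int) :: ((List.range j).map (fun a : Nat => (a:Int))).reverse := by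
      simp [List.range_succ]
    rw [hrev, List.foldl_cons, F_state v s s' W j hs' (by omega) hlen]
    exact ih (by omega)

theorem foldl_const_id {α β : Type} (l : List α) (st : β) :
    l.foldl (fun st _ => st) st = st := by
  induction l generalizing st with
  | nil => rfl
  | cons a l ih => simp [List.foldl_cons, ih]

theorem rowsB_nilcps : ∀ (vs ss : List Int), ss.length = vs.length →
    rowsB [] vs ss = (List.replicate vs.length [], List.replicate vs.length []) := by
  intro vs
  induction vs with
  | nil => intro ss h; rw [List.length_eq_zero_iff.mp h]; rfl
  | cons vi vrest ih =>
    intro ss h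
    match ss with
    | si :: srest =>
      match vrest with
      | [] => simp [rowsB_single]
      | a :: l =>
        rw [rowsB_pair [] vi si (a :: l) srest (by simp)]
        rw [ih srest (by simpa using h)]
        simp [List.replicate_succ]

-- ===== VERDICT (by name: the statement is the Claim_ definition above) =====
theorem DPKP_spec : Claim_equal_DPKP := by
  intro v s C _ hpre
  obtain ⟨hne, hlen, -⟩ := hpre
  show DPKP v s C = DPKP_alt v s C
  simp only [DPKP, DPKP_alt]
  by_cases hv : v = []
  · have hC : C < 0 := by rcases hne with h | h; exacts [absurd hv h, h]
    subst hv
    have h1 : PySem.List.pyRange 0 (C+1) 1 = ([] : List Int) := by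
      rw [cps_eq]; rw [show (C+1).toNat = 0 by omega]; rfl
    simp [h1]
  · simp only [hv, if_false]
    by_cases hC0 : C < 0
    · -- C < 0: no columns, both sides are n empty rows
      have h1 : PySem.List.pyRange 0 (C+1) 1 = ([] : List Int) := by
        rw [cps_eq]; rw [show (C+1).toNat = 0 by omega]; rfl
      rw [h1, rowsB_nilcps v (s.take v.length) (by simp [hlen])]
      simp only [List.foldl_nil]
      rw [foldl_const_id]
      simp [pyRange_nat, Function.comp_def, List.map_const']
    · -- main case: 0 ≤ C
      have hn1 : 1 ≤ v.length := by
        cases v with | nil => exact absurd rfl hv | cons a l => simp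
      rw [cps_eq C]
      have hz : ((List.range (C+1).toNat).map (fun k : Nat => (k:Int))).map (fun _ => (0:Int))
          = List.replicate (C+1).toNat 0 := zrow_eq (C+1).toNat
      have hV0 : (PySem.List.pyRange 0 (v.length : Int) 1).map
            (fun _ => ((List.range (C+1).toNat).map (fun k : Nat => (k:Int))).map (fun _ => (0:Int)))
          = List.replicate v.length (List.replicate (C+1).toNat 0) := by
        rw [pyRange_nat, hz]; simp [Function.comp_def, List.map_const']
      rw [hV0]
      have hsplit : List.replicate v.length (List.replicate (C+1).toNat (0:Int))
          = List.replicate (v.length - 1) (List.replicate (C+1).toNat 0)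
            ++ [List.replicate (C+1).toNat 0] := by
        conv_lhs => rw [show v.length = (v.length - 1) + 1 by omega]
        rw [List.replicate_succ']
      rw [hsplit]
      have hbase := baseFill v s (v.length : Int) (v.length - 1) (by omega)
        (C+1).toNat 0 (List.replicate (v.length - 1) (List.replicate (C+1).toNat 0))
        (List.replicate (v.length - 1) (List.replicate (C+1).toNat 0)) [] []
        (by simp) (by simp) rfl rfl
      simp only [List.nil_append] at hbase
      rw [← List.range_eq_range'] at hbase
      rw [hbase]
      -- the table after the first loop is stateJ (n-1)
      have hdv : v.drop (v.length - 1) = [v[v.length - 1]] := by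
        have h := (List.getElem_cons_drop (show v.length - 1 < v.length by omega)).symm
        rwa [show v.length - 1 + 1 = v.length by omega, List.drop_length] at h
      have hds : (s.take v.length).drop (v.length - 1)
          = (s.take v.length)[v.length - 1]'(by simp; omega)
            :: (s.take v.length).drop (v.length - 1 + 1) :=
        (List.getElem_cons_drop (by simp; omega)).symm
      have hcast : ((v.length : Int) - 1) = ((v.length - 1 : Nat) : Int) := by omega
      have hstate : (List.replicate (v.length - 1) (List.replicate (C+1).toNat (0:Int)) ++
            [(List.range' 0 (C+1).toNat).map
              (fun a : Nat => if pyGetI s ((v.length:Int) - 1) ≤ (a:Int) then pyGetI v ((v.length:Int) - 1) else 0)],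
          List.replicate (v.length - 1) (List.replicate (C+1).toNat (0:Int)) ++
            [(List.range' 0 (C+1).toNat).map
              (fun a : Nat => if pyGetI s ((v.length:Int) - 1) ≤ (a:Int) then (1:Int) else 0)])
          = stateJ ((List.range (C+1).toNat).map (fun k : Nat => (k:Int))) v (s.take v.length)
              (v.length - 1) := by
        unfold stateJ
        rw [hdv, hds, rowsB_single]
        have hsv : pyGetI s ((v.length:Int) - 1)
            = (s.take v.length)[v.length - 1]'(by simp; omega) := by
          rw [hcast, pyGetI_nat s _ (by omega)]
          simp [List.getElem_take]
        have hvv : pyGetI v ((v.length:Int) - 1) = v[v.length - 1] := by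
          rw [hcast]; exact pyGetI_nat v _ (by omega)
        rw [hsv, hvv, hz, List.range_eq_range', List.map_map]
        simp [Function.comp_def]
      rw [← List.range_eq_range'] at hstate
      rw [hstate]
      have houter : PySem.List.pyRange 0 ((v.length:Int) - 1) 1
          = (List.range (v.length - 1)).map (fun k : Nat => (k:Int)) := by
        rw [hcast, pyRange_nat]
      rw [houter, chain v s (s.take v.length) (C+1).toNat rfl hlen (v.length - 1) (by omega)]
      unfold stateJ
      simp
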